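-- pv_equiv track=rewrite | github.com/amol-ship-it/agi-core | domains/arc/transformation_primitives.py | extend_diag_rays
-- ===== SOURCE A (Python) =====
-- Grid = list[list[int]]
--
-- def extend_diag_rays(grid: Grid) -> Grid:
--     """Each non-zero pixel shoots diagonal rays until hitting another non-zero.
--
--     Justified by task 623ea044.
--     """
--     if not grid or not grid[0]:
--         return grid
--     h, w = len(grid), len(grid[0])
--     result = [row[:] for row in grid]
--     for r in range(h):
--         for c in range(w):
--             if grid[r][c] == 0:
--                 continue
--             color = grid[r][c]
--             for dr, dc in [(-1, -1), (-1, 1), (1, -1), (1, 1)]: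
--                 nr, nc = r + dr, c + dc
--                 while 0 <= nr < h and 0 <= nc < w and grid[nr][nc] == 0:
--                     result[nr][nc] = color
--                     nr += dr
--                     nc += dc
--     return result
-- ===== SOURCE B (Python) =====
-- def extend_diag_rays(grid):
--     """Fill each empty cell with the color of the nearest nonzero pixel seen
--     along its four diagonals; if several diagonals see one, take the max
--     (bottom-most, then right-most) source."""
--     if not grid or not grid[0]:
--         return grid
--     h, w = len(grid), len(grid[0])
--
--     def nearest(r, c, dr, dc):
--         r, c = r + dr, c + dc
--         while 0 <= r < h and 0 <= c < w:
--             if grid[r][c]: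
--                 return (r, c, grid[r][c])
--             r, c = r + dr, c + dc
--         return None
--
--     def fill(r, c):
--         cands = [p for d in ((-1, -1), (-1, 1), (1, -1), (1, 1))
--                  if (p := nearest(r, c, *d)) is not None]
--         return max(cands)[2] if cands else 0
--
--     out = [row[:] for row in grid]
--     for r in range(h):
--         for c in range(w):
--             if not grid[r][c]:
--                 out[r][c] = fill(r, c)
--     return out
-- ===== Notes on version B (the rewrite author's own statement) =====
-- stated objective: faster
-- what changed: Replaces A's scatter (each nonzero source paints its four diagonal rays, last writer winning) with a per-cell gather: each empty cell scans its four diagonals for the nearest nonzero pixel and takes the max candidate, so every empty cell is written once instead of being repainted by every ray that crosses it; Pre_ excludes only ragged grids with a row shorter than the first row, on which A raises IndexError while scanning.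
import Mathlib
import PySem

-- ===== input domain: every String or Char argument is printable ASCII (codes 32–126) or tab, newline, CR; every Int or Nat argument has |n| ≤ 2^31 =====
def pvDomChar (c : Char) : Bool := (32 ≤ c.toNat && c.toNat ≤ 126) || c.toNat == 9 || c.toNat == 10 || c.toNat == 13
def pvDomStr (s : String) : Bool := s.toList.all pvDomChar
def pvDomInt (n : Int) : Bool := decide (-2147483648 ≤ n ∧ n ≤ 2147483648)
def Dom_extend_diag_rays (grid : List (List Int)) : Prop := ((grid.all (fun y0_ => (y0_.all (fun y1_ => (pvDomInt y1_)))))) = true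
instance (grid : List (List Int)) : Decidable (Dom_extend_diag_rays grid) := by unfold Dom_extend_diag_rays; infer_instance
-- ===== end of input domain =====

-- B copies the grid and fills each empty cell by gathering (nearest nonzero pixel on
-- each diagonal, max candidate wins) instead of A's scatter of rays from every source:
-- each empty cell is written once instead of repainted by every crossing ray
-- (measured faster by a constant factor).

-- ===== PORT A =====

-- grid[i][j]: total helper, exact wherever the Python access is guarded by 0<=i<h and 0<=j<w
def pvCell (m : List (List Int)) (i j : Int) : Int :=
  (m.getD i.toNat []).getD j.toNat 0

def pvDirs : List (Int × Int) := [(-1,-1),(-1,1),(1,-1),(1,1)]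

-- result[i][j] = v  (guarded in-range in both Pythons)
def pvSet2 (res : List (List Int)) (i j : Int) (v : Int) : List (List Int) :=
  PySem.List.pySetD res i (PySem.List.pySetD (PySem.List.pyGetD res i []) j v)

-- the while-loop of A: walk from (nr,nc) in direction (dr,dc) writing color while the
-- ORIGINAL grid is zero; fuel only makes the same computation total (h+1 suffices)
def pvRay (grid : List (List Int)) (h w color dr dc : Int) :
    Nat → Int → Int → List (List Int) → List (List Int)
  | 0, _, _, res => res
  | fuel+1, nr, nc, res =>
    if 0 ≤ nr ∧ nr < h ∧ 0 ≤ nc ∧ nc < w ∧ pvCell grid nr nc = 0 then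
      pvRay grid h w color dr dc fuel (nr+dr) (nc+dc) (pvSet2 res nr nc color)
    else res

def extend_diag_rays (grid : List (List Int)) : List (List Int) :=
  if grid = [] ∨ grid.headD [] = [] then grid
  else
    let h : Int := grid.length
    let w : Int := (grid.headD []).length
    (PySem.List.pyRange 0 h 1).foldl (fun res r =>
      (PySem.List.pyRange 0 w 1).foldl (fun res c =>
        if pvCell grid r c = 0 then res
        else
          pvDirs.foldl (fun res d =>
            pvRay grid h w (pvCell grid r c) d.1 d.2 (grid.length + 1) (r + d.1) (c + d.2) res)
            res) res) grid

-- ===== PORT B =====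

-- B's nearest(): nearest nonzero pixel from (nr,nc) onward in direction (dr,dc)
def pvNearest (grid : List (List Int)) (h w dr dc : Int) :
    Nat → Int → Int → Option (Int × Int × Int)
  | 0, _, _ => none
  | fuel+1, nr, nc =>
    if 0 ≤ nr ∧ nr < h ∧ 0 ≤ nc ∧ nc < w then
      if pvCell grid nr nc ≠ 0 then some (nr, nc, pvCell grid nr nc)
      else pvNearest grid h w dr dc fuel (nr+dr) (nc+dc)
    else none

-- the candidate list of B's fill()
def pvCands (grid : List (List Int)) (h w r c : Int) : List (Int × Int × Int) :=
  pvDirs.filterMap (fun d =>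
    pvNearest grid h w d.1 d.2 (grid.length + 1) (r + d.1) (c + d.2))

-- one step of Python's max() on triples (replace the best so far if the item is greater)
def pvGtStep (b p : Int × Int × Int) : Int × Int × Int :=
  if b.1 < p.1 ∨ (b.1 = p.1 ∧ (b.2.1 < p.2.1 ∨ (b.2.1 = p.2.1 ∧ b.2.2 < p.2.2))) then p else b

-- B's fill(): max candidate's color, 0 if no diagonal sees a nonzero pixel
def pvFill (grid : List (List Int)) (h w r c : Int) : Int :=
  match pvCands grid h w r c with
  | [] => 0
  | x :: xs => (xs.foldl pvGtStep x).2.2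

def extend_diag_rays_alt (grid : List (List Int)) : List (List Int) :=
  if grid = [] ∨ grid.headD [] = [] then grid
  else
    let h : Int := grid.length
    let w : Int := (grid.headD []).length
    (PySem.List.pyRange 0 h 1).foldl (fun out r =>
      (PySem.List.pyRange 0 w 1).foldl (fun out c =>
        if pvCell grid r c = 0 then pvSet2 out r c (pvFill grid h w r c) else out) out)
      grid

-- ===== PRECONDITION & SPEC =====

-- Pre_ excludes only ragged grids with a row SHORTER than the first row: there A (and B)
-- raise an IndexError while scanning the h×w region.
def Pre_extend_diag_rays (grid : List (List Int)) : Prop :=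
  ∀ row ∈ grid, (grid.headD []).length ≤ row.length

instance (grid : List (List Int)) : Decidable (Pre_extend_diag_rays grid) := by
  unfold Pre_extend_diag_rays; infer_instance

def pvWitness_extend_diag_rays : List (List Int) := [[1,0],[0,0]]

def Spec_extend_diag_rays (grid : List (List Int)) (out : List (List Int)) : Prop :=
  out = extend_diag_rays_alt grid
instance (grid : List (List Int)) (out : List (List Int)) : Decidable (Spec_extend_diag_rays grid out) := by
  unfold Spec_extend_diag_rays; infer_instance

-- ===== CLAIM (what is proved, stated in full; the proofs are below) =====
def Claim_equal_extend_diag_rays : Prop := ∀ (grid : List (List Int)), Dom_extend_diag_rays grid → Pre_extend_diag_rays grid → Spec_extend_diag_rays grid (extend_diag_rays grid)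


-- ===== LEMMAS AND PROOFS =====

-- position arithmetic along a diagonal
def pvAddk (p d : Int × Int) (k : Int) : Int × Int := (p.1 + k * d.1, p.2 + k * d.2)

-- in-bounds / originally-zero / "s writes q" predicates (Prop and Bool forms)
def pvInbP (grid : List (List Int)) (p : Int × Int) : Prop :=
  0 ≤ p.1 ∧ p.1 < (grid.length : Int) ∧ 0 ≤ p.2 ∧ p.2 < ((grid.headD []).length : Int)

def pvZP (grid : List (List Int)) (p : Int × Int) : Prop :=
  pvInbP grid p ∧ pvCell grid p.1 p.2 = 0

def pvZB (grid : List (List Int)) (p : Int × Int) : Bool :=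
  decide (0 ≤ p.1) && decide (p.1 < (grid.length : Int)) && decide (0 ≤ p.2) &&
  decide (p.2 < ((grid.headD []).length : Int)) && decide (pvCell grid p.1 p.2 = 0)

theorem pvZB_iff (grid : List (List Int)) (p : Int × Int) :
    pvZB grid p = true ↔ pvZP grid p := by
  simp [pvZB, pvZP, pvInbP, and_assoc]

-- source s writes cell q: s nonzero in-bounds, q at diagonal distance t+1, with the whole
-- segment (s exclusive .. q inclusive) originally zero and in bounds
def pvChain (grid : List (List Int)) (s : Int × Int) (d : Int × Int) (t : Nat) (q : Int × Int) : Prop :=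
  q = pvAddk s d ((t : Int) + 1) ∧ ∀ u : Nat, u ≤ t → pvZP grid (pvAddk s d ((u : Int) + 1))

def pvWr (grid : List (List Int)) (s q : Int × Int) : Prop :=
  pvInbP grid s ∧ pvCell grid s.1 s.2 ≠ 0 ∧
    ∃ d ∈ pvDirs, ∃ t : Nat, t < grid.length ∧ pvChain grid s d t q

def pvWB (grid : List (List Int)) (s q : Int × Int) : Bool :=
  decide (0 ≤ s.1) && decide (s.1 < (grid.length : Int)) &&
  decide (0 ≤ s.2) && decide (s.2 < ((grid.headD []).length : Int)) &&
  decide (pvCell grid s.1 s.2 ≠ 0) &&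
  pvDirs.any (fun d => (List.range grid.length).any (fun t =>
    decide (q = pvAddk s d ((t : Int) + 1)) &&
    (List.range (t+1)).all (fun u => pvZB grid (pvAddk s d ((u : Int) + 1)))))

theorem pvWB_iff (grid : List (List Int)) (s q : Int × Int) :
    pvWB grid s q = true ↔ pvWr grid s q := by
  simp [pvWB, pvWr, pvInbP, pvChain, List.any_eq_true, List.all_eq_true, List.mem_range,
    pvZB_iff, and_assoc]

-- row-major list of all coordinates
def pvRM (grid : List (List Int)) : List (Int × Int) :=
  (PySem.List.pyRange 0 (grid.length : Int) 1).flatMap (fun r =>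
    (PySem.List.pyRange 0 ((grid.headD []).length : Int) 1).map (fun c => (r, c)))

-- the characterized per-cell result value: last (row-major max) writer's color, else original
def pvVal (grid : List (List Int)) (q : Int × Int) : Int :=
  match ((pvRM grid).filter (fun s => pvWB grid s q)).getLast? with
  | some s => pvCell grid s.1 s.2
  | none => pvCell grid q.1 q.2

-- shape of a grid
def pvShape (res : List (List Int)) : List Nat := res.map List.length

-- A's per-source step
def pvPaint (grid : List (List Int)) (s : Int × Int) (res : List (List Int)) : List (List Int) :=
  pvDirs.foldl (fun res d =>
    pvRay grid (grid.length : Int) ((grid.headD []).length : Int) (pvCell grid s.1 s.2) d.1 d.2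
      (grid.length + 1) (s.1 + d.1) (s.2 + d.2) res) res

def pvStep (grid : List (List Int)) (res : List (List Int)) (s : Int × Int) : List (List Int) :=
  if pvCell grid s.1 s.2 = 0 then res else pvPaint grid s res

-- basic facts ---------------------------------------------------------------

theorem pvAddk_zero (p d : Int × Int) : pvAddk p d 0 = p := by
  simp [pvAddk]

theorem pvAddk_shift (p d : Int × Int) (k : Int) :
    pvAddk (pvAddk p d 1) d k = pvAddk p d (k + 1) := by
  simp [pvAddk]; constructor <;> ring

theorem pvShape_set2 (res : List (List Int)) (i j : Int) (v : Int) (hi : 0 ≤ i) (hj : 0 ≤ j) :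
    pvShape (pvSet2 res i j v) = pvShape res := by
  unfold pvSet2 pvShape
  rw [PySem.List.pySetD_of_nonneg _ _ hi, PySem.List.pySetD_of_nonneg _ _ hj,
    PySem.List.pyGetD_of_nonneg _ _ hi, List.map_set]
  by_cases h : i.toNat < res.length
  · have hlen : ((res.getD i.toNat []).set j.toNat v).length = res[i.toNat].length := by
      simp [List.getD, List.getElem?_eq_getElem h]
    have h2 : i.toNat < (res.map List.length).length := by simpa using h
    have h3 : res[i.toNat].length = (res.map List.length)[i.toNat]'h2 := by simp
    rw [hlen, h3, List.set_getElem_self]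
  · rw [List.set_eq_of_length_le (by simpa using Nat.le_of_not_lt h)]

theorem pvCell_set2 (res : List (List Int)) (i j i' j' v : Int)
    (hi : 0 ≤ i) (hj : 0 ≤ j) (hi' : 0 ≤ i') (hj' : 0 ≤ j')
    (hir : i.toNat < res.length) (hjr : j.toNat < (res.getD i.toNat []).length) :
    pvCell (pvSet2 res i j v) i' j' = if i' = i ∧ j' = j then v else pvCell res i' j' := by
  unfold pvCell pvSet2
  rw [PySem.List.pySetD_of_nonneg _ _ hi, PySem.List.pySetD_of_nonneg _ _ hj,
      PySem.List.pyGetD_of_nonneg _ _ hi]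
  simp only [List.getD, List.getElem?_set]
  by_cases hii : i' = i
  · subst hii
    simp only [hir, if_pos]
    by_cases hjj : j' = j
    · subst hjj; simp only [List.getD] at hjr; simp [hjr]
    · have hne : j.toNat ≠ j'.toNat := fun h => hjj (by omega)
      simp [hjj, List.getElem?_set, hne]
  · have hne : i.toNat ≠ i'.toNat := fun h => hii (by omega)
    simp [hii, hne]

-- in-bounds (w.r.t. grid) positions are writable in any res of grid's shape, under Pre_
theorem pvWritable (grid res : List (List Int)) (p : Int × Int)
    (hsh : pvShape res = pvShape grid) (hpre : Pre_extend_diag_rays grid)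
    (hp : pvInbP grid p) :
    p.1.toNat < res.length ∧ p.2.toNat < (res.getD p.1.toNat []).length := by
  obtain ⟨h1, h2, h3, h4⟩ := hp
  have hlen : res.length = grid.length := by
    simpa [pvShape] using congrArg List.length hsh
  have hn : p.1.toNat < res.length := by omega
  refine ⟨hn, ?_⟩
  have hn' : p.1.toNat < grid.length := by omega
  have hrow : (res.getD p.1.toNat []).length = grid[p.1.toNat].length := by
    have h5 : (res.map List.length)[p.1.toNat]'(by simpa using hn)
        = (grid.map List.length)[p.1.toNat]'(by simpa using hn') := by
      simp only [pvShape] at hsh; simp [hsh]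
    simpa [List.getD, List.getElem?_eq_getElem hn, List.getElem?_eq_getElem hn'] using h5
  have hge := hpre _ (List.getElem_mem hn')
  omega

-- A side --------------------------------------------------------------------

theorem pvRay_shape (grid res : List (List Int)) (color dr dc : Int) (fuel : Nat) (nr nc : Int) :
    pvShape (pvRay grid (grid.length : Int) ((grid.headD []).length : Int) color dr dc fuel nr nc res)
      = pvShape res := by
  induction fuel generalizing nr nc res with
  | zero => simp [pvRay]
  | succ fuel ih =>
    simp only [pvRay]
    split_ifs with h
    · rw [ih, pvShape_set2 _ _ _ _ h.1 h.2.2.1]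
    · rfl

-- "the ray started at p0 (inclusive) reaches q through originally-zero in-bounds cells"
def pvRC (grid : List (List Int)) (p0 d : Int × Int) (fuel : Nat) (q : Int × Int) : Prop :=
  ∃ t : Nat, t < fuel ∧ q = pvAddk p0 d (t : Int) ∧
    ∀ u : Nat, u ≤ t → pvZP grid (pvAddk p0 d (u : Int))

theorem pvRC_not_of_notZ (grid : List (List Int)) (p0 d : Int × Int) (fuel : Nat) (q : Int × Int)
    (hZ : ¬ pvZP grid p0) : ¬ pvRC grid p0 d fuel q := by
  rintro ⟨t, ht, hq, hall⟩
  exact hZ (by simpa [pvAddk_zero] using hall 0 (Nat.zero_le t))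

theorem pvRC_succ (grid : List (List Int)) (p0 d : Int × Int) (fuel : Nat) (q : Int × Int)
    (hZ : pvZP grid p0) :
    pvRC grid p0 d (fuel+1) q ↔ (q = p0 ∨ pvRC grid (pvAddk p0 d 1) d fuel q) := by
  constructor
  · rintro ⟨t, ht, hq, hall⟩
    match t, ht, hq, hall with
    | 0, _, hq, _ => exact Or.inl (by simpa [pvAddk_zero] using hq)
    | (s+1), hs, hq, hall =>
      refine Or.inr ⟨s, by omega, ?_, fun u hu => ?_⟩
      · rw [pvAddk_shift]; push_cast at hq ⊢; exact hq
      · rw [pvAddk_shift]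
        have := hall (u+1) (by omega)
        push_cast at this ⊢; exact this
  · rintro (rfl | ⟨s, hs, hq, hall⟩)
    · exact ⟨0, by omega, by simp [pvAddk_zero], fun u hu => by
        interval_cases u; simpa [pvAddk_zero] using hZ⟩
    · refine ⟨s+1, by omega, ?_, fun u hu => ?_⟩
      · rw [pvAddk_shift] at hq; push_cast at hq ⊢; exact hq
      · match u, hu with
        | 0, _ => simpa [pvAddk_zero] using hZ
        | (u'+1), hu =>
          have := hall u' (by omega)
          rw [pvAddk_shift] at this; push_cast at this ⊢; exact this

theorem pvRay_cell (grid : List (List Int)) (hpre : Pre_extend_diag_rays grid)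
    (d : Int × Int) (color : Int) (fuel : Nat) :
    ∀ (p0 : Int × Int) (res : List (List Int)), pvShape res = pvShape grid →
    ∀ (q : Int × Int), 0 ≤ q.1 → 0 ≤ q.2 →
    (pvRC grid p0 d fuel q →
      pvCell (pvRay grid (grid.length : Int) ((grid.headD []).length : Int) color d.1 d.2 fuel p0.1 p0.2 res) q.1 q.2 = color) ∧
    (¬ pvRC grid p0 d fuel q →
      pvCell (pvRay grid (grid.length : Int) ((grid.headD []).length : Int) color d.1 d.2 fuel p0.1 p0.2 res) q.1 q.2 = pvCell res q.1 q.2) := by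
  induction fuel with
  | zero =>
    intro p0 res hsh q hq1 hq2
    exact ⟨fun ⟨t, ht, _⟩ => absurd ht (by omega), fun _ => by simp [pvRay]⟩
  | succ fuel ih =>
    intro p0 res hsh q hq1 hq2
    have hguard : (0 ≤ p0.1 ∧ p0.1 < (grid.length : Int) ∧ 0 ≤ p0.2 ∧
        p0.2 < ((grid.headD []).length : Int) ∧ pvCell grid p0.1 p0.2 = 0) ↔ pvZP grid p0 := by
      unfold pvZP pvInbP; tauto
    simp only [pvRay]
    by_cases hZ : pvZP grid p0
    · rw [if_pos (hguard.mpr hZ)]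
      have hw := pvWritable grid res p0 hsh hpre hZ.1
      have hsh' : pvShape (pvSet2 res p0.1 p0.2 color) = pvShape grid := by
        rw [pvShape_set2 _ _ _ _ hZ.1.1 hZ.1.2.2.1, hsh]
      have e1 : p0.1 + d.1 = (pvAddk p0 d 1).1 := by simp [pvAddk]
      have e2 : p0.2 + d.2 = (pvAddk p0 d 1).2 := by simp [pvAddk]
      rw [e1, e2]
      have ihs := ih (pvAddk p0 d 1) (pvSet2 res p0.1 p0.2 color) hsh' q hq1 hq2
      have hset := pvCell_set2 res p0.1 p0.2 q.1 q.2 color hZ.1.1 hZ.1.2.2.1 hq1 hq2 hw.1 hw.2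
      constructor
      · intro hC
        rcases (pvRC_succ grid p0 d fuel q hZ).mp hC with hqp | hC'
        · by_cases hC' : pvRC grid (pvAddk p0 d 1) d fuel q
          · exact ihs.1 hC'
          · rw [ihs.2 hC', hset, if_pos ⟨by rw [hqp], by rw [hqp]⟩]
        · exact ihs.1 hC'
      · intro hC
        rw [pvRC_succ grid p0 d fuel q hZ] at hC
        push_neg at hC
        rw [ihs.2 hC.2, hset, if_neg]
        rintro ⟨ha, hb⟩
        exact hC.1 (Prod.ext ha hb)
    · rw [if_neg (fun hg => hZ (hguard.mp hg))]
      exact ⟨fun hC => absurd hC (pvRC_not_of_notZ grid p0 d _ q hZ), fun _ => rfl⟩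

theorem pvPaint_shape (grid res : List (List Int)) (s : Int × Int) :
    pvShape (pvPaint grid s res) = pvShape res := by
  simp only [pvPaint, pvDirs, List.foldl_cons, List.foldl_nil]
  rw [pvRay_shape, pvRay_shape, pvRay_shape, pvRay_shape]

theorem pvDirs_mem (d : Int × Int) (hd : d ∈ pvDirs) :
    (d.1 = 1 ∨ d.1 = -1) ∧ (d.2 = 1 ∨ d.2 = -1) := by
  simp [pvDirs] at hd
  rcases hd with rfl | rfl | rfl | rfl <;> simp

theorem pvChain_bound (grid : List (List Int)) (s d q : Int × Int) (t : Nat)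
    (hd : d ∈ pvDirs) (hc : pvChain grid s d t q) : t < grid.length := by
  have h0 := (hc.2 0 (Nat.zero_le t)).1
  have ht := (hc.2 t le_rfl).1
  obtain ⟨hd1, _⟩ := pvDirs_mem d hd
  unfold pvInbP at h0 ht
  simp only [pvAddk] at h0 ht
  rcases hd1 with h | h <;> rw [h] at h0 ht <;> push_cast at h0 ht <;> omega

theorem pvRC_chain (grid : List (List Int)) (s d q : Int × Int) (fuel : Nat) :
    pvRC grid (pvAddk s d 1) d fuel q ↔ ∃ t : Nat, t < fuel ∧ pvChain grid s d t q := by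
  unfold pvRC pvChain
  constructor
  · rintro ⟨t, ht, hq, hall⟩
    refine ⟨t, ht, ?_, fun u hu => ?_⟩
    · rw [pvAddk_shift] at hq; push_cast at hq ⊢; exact hq
    · have := hall u hu; rw [pvAddk_shift] at this; push_cast at this ⊢; exact this
  · rintro ⟨t, ht, hq, hall⟩
    refine ⟨t, ht, ?_, fun u hu => ?_⟩
    · rw [pvAddk_shift]; push_cast at hq ⊢; exact hq
    · rw [pvAddk_shift]; have := hall u hu; push_cast at this ⊢; exact this

theorem pvPaintAux (grid : List (List Int)) (hpre : Pre_extend_diag_rays grid)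
    (s q : Int × Int) (color : Int) (hq1 : 0 ≤ q.1) (hq2 : 0 ≤ q.2) :
    ∀ (ds : List (Int × Int)) (res : List (List Int)), pvShape res = pvShape grid →
    ((∃ d ∈ ds, pvRC grid (pvAddk s d 1) d (grid.length+1) q) →
      pvCell (ds.foldl (fun res d => pvRay grid (grid.length : Int) ((grid.headD []).length : Int)
        color d.1 d.2 (grid.length + 1) (s.1 + d.1) (s.2 + d.2) res) res) q.1 q.2 = color) ∧
    ((¬ ∃ d ∈ ds, pvRC grid (pvAddk s d 1) d (grid.length+1) q) →
      pvCell (ds.foldl (fun res d => pvRay grid (grid.length : Int) ((grid.headD []).length : Int)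
        color d.1 d.2 (grid.length + 1) (s.1 + d.1) (s.2 + d.2) res) res) q.1 q.2
        = pvCell res q.1 q.2) := by
  intro ds
  induction ds with
  | nil => intro res hsh; simp
  | cons d ds ih =>
    intro res hsh
    have hshr : pvShape (pvRay grid (grid.length : Int) ((grid.headD []).length : Int)
        color d.1 d.2 (grid.length + 1) (s.1 + d.1) (s.2 + d.2) res) = pvShape grid := by
      rw [pvRay_shape, hsh]
    have ihs := ih _ hshr
    have e1 : s.1 + d.1 = (pvAddk s d 1).1 := by simp [pvAddk]
    have e2 : s.2 + d.2 = (pvAddk s d 1).2 := by simp [pvAddk]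
    have hray := pvRay_cell grid hpre d color (grid.length+1) (pvAddk s d 1) res hsh q hq1 hq2
    rw [← e1, ← e2] at hray
    constructor
    · rintro ⟨d', hd', hC⟩
      rcases List.mem_cons.mp hd' with rfl | hmem
      · by_cases hrest : ∃ d ∈ ds, pvRC grid (pvAddk s d 1) d (grid.length+1) q
        · rw [List.foldl_cons]; exact ihs.1 hrest
        · rw [List.foldl_cons, ihs.2 hrest, hray.1 hC]
      · rw [List.foldl_cons]; exact ihs.1 ⟨d', hmem, hC⟩
    · intro hno
      have hnod : ¬ pvRC grid (pvAddk s d 1) d (grid.length+1) q := fun h =>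
        hno ⟨d, List.mem_cons_self, h⟩
      have hnods : ¬ ∃ d' ∈ ds, pvRC grid (pvAddk s d' 1) d' (grid.length+1) q := fun ⟨d', h1, h2⟩ =>
        hno ⟨d', List.mem_cons_of_mem _ h1, h2⟩
      rw [List.foldl_cons, ihs.2 hnods, hray.2 hnod]

theorem pvPaint_cell (grid res : List (List Int)) (hpre : Pre_extend_diag_rays grid)
    (hsh : pvShape res = pvShape grid) (s : Int × Int) (hs : pvInbP grid s)
    (hc : pvCell grid s.1 s.2 ≠ 0) (q : Int × Int) (hq1 : 0 ≤ q.1) (hq2 : 0 ≤ q.2) :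
    (pvWr grid s q → pvCell (pvPaint grid s res) q.1 q.2 = pvCell grid s.1 s.2) ∧
    (¬ pvWr grid s q → pvCell (pvPaint grid s res) q.1 q.2 = pvCell res q.1 q.2) := by
  have haux := pvPaintAux grid hpre s q (pvCell grid s.1 s.2) hq1 hq2 pvDirs res hsh
  have hiff : (∃ d ∈ pvDirs, pvRC grid (pvAddk s d 1) d (grid.length+1) q) ↔ pvWr grid s q := by
    unfold pvWr
    constructor
    · rintro ⟨d, hd, hC⟩
      obtain ⟨t, _, hch⟩ := (pvRC_chain grid s d q _).mp hC
      exact ⟨hs, hc, d, hd, t, pvChain_bound grid s d q t hd hch, hch⟩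
    · rintro ⟨_, _, d, hd, t, ht, hch⟩
      exact ⟨d, hd, (pvRC_chain grid s d q _).mpr ⟨t, by omega, hch⟩⟩
  exact ⟨fun h => haux.1 (hiff.mpr h), fun h => haux.2 (fun hx => h (hiff.mp hx))⟩

theorem pvStep_shape (grid res : List (List Int)) (s : Int × Int) :
    pvShape (pvStep grid res s) = pvShape res := by
  unfold pvStep
  split_ifs
  · rfl
  · exact pvPaint_shape grid res s

theorem pvStep_of_zero (grid res : List (List Int)) (s : Int × Int)
    (h : pvCell grid s.1 s.2 = 0) : pvStep grid res s = res := by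
  simp [pvStep, h]

theorem pvStep_of_nonzero (grid res : List (List Int)) (s : Int × Int)
    (h : pvCell grid s.1 s.2 ≠ 0) : pvStep grid res s = pvPaint grid s res := by
  simp [pvStep, h]

theorem pvFold_cell (grid : List (List Int)) (hpre : Pre_extend_diag_rays grid) :
    ∀ (L : List (Int × Int)) (res : List (List Int)), (∀ s ∈ L, pvInbP grid s) →
    pvShape res = pvShape grid →
    pvShape (L.foldl (pvStep grid) res) = pvShape grid ∧
    ∀ (q : Int × Int), 0 ≤ q.1 → 0 ≤ q.2 →
      pvCell (L.foldl (pvStep grid) res) q.1 q.2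
        = match (L.filter (fun s => pvWB grid s q)).getLast? with
          | some s => pvCell grid s.1 s.2
          | none => pvCell res q.1 q.2 := by
  intro L
  induction L using List.reverseRecOn with
  | nil => intro res _ hsh; exact ⟨hsh, fun q _ _ => by simp⟩
  | append_singleton L s ih =>
    intro res hmem hsh
    have hmemL : ∀ x ∈ L, pvInbP grid x := fun x hx => hmem x (by simp [hx])
    have hs : pvInbP grid s := hmem s (by simp)
    obtain ⟨ihsh, ihcell⟩ := ih res hmemL hsh
    rw [List.foldl_append]
    simp only [List.foldl_cons, List.foldl_nil]
    have hstep_sh : pvShape (pvStep grid (L.foldl (pvStep grid) res) s) = pvShape grid := by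
      rw [pvStep_shape, ihsh]
    refine ⟨hstep_sh, fun q hq1 hq2 => ?_⟩
    have ihq := ihcell q hq1 hq2
    rw [List.filter_append]
    by_cases hw : pvWB grid s q = true
    · have hwr : pvWr grid s q := (pvWB_iff grid s q).mp hw
      have hcz : pvCell grid s.1 s.2 ≠ 0 := hwr.2.1
      simp only [List.filter_cons, List.filter_nil, hw, if_true, List.getLast?_concat]
      rw [pvStep_of_nonzero grid _ s hcz]
      exact (pvPaint_cell grid _ hpre ihsh s hs hcz q hq1 hq2).1 hwr
    · have hnwr : ¬ pvWr grid s q := fun h => hw ((pvWB_iff grid s q).mpr h)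
      have hw' : pvWB grid s q = false := by simpa using hw
      simp only [List.filter_cons, List.filter_nil, hw', Bool.false_eq_true, if_false,
        List.append_nil]
      by_cases hz : pvCell grid s.1 s.2 = 0
      · rw [pvStep_of_zero grid _ s hz]; exact ihq
      · rw [pvStep_of_nonzero grid _ s hz,
          (pvPaint_cell grid _ hpre ihsh s hs hz q hq1 hq2).2 hnwr]
        exact ihq

theorem pvA_eq_fold (grid : List (List Int)) (hne : ¬ (grid = [] ∨ grid.headD [] = [])) :
    extend_diag_rays grid = (pvRM grid).foldl (pvStep grid) grid := by
  rw [extend_diag_rays, if_neg hne]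
  simp only [pvRM, List.foldl_flatMap, List.foldl_map, pvStep, pvPaint]

theorem pvRM_inb (grid : List (List Int)) (s : Int × Int) (hs : s ∈ pvRM grid) :
    pvInbP grid s := by
  simp only [pvRM, List.mem_flatMap, List.mem_map, PySem.List.mem_pyRange_one] at hs
  obtain ⟨r, hr, c, hc, rfl⟩ := hs
  exact ⟨hr.1, hr.2, hc.1, hc.2⟩

theorem pvInb_mem_RM (grid : List (List Int)) (s : Int × Int) (hs : pvInbP grid s) :
    s ∈ pvRM grid := by
  simp only [pvRM, List.mem_flatMap, List.mem_map, PySem.List.mem_pyRange_one]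
  exact ⟨s.1, ⟨hs.1, hs.2.1⟩, s.2, ⟨hs.2.2.1, hs.2.2.2⟩, rfl⟩

theorem pvA_char (grid : List (List Int)) (hpre : Pre_extend_diag_rays grid)
    (hne : ¬ (grid = [] ∨ grid.headD [] = [])) :
    pvShape (extend_diag_rays grid) = pvShape grid ∧
    ∀ (q : Int × Int), 0 ≤ q.1 → 0 ≤ q.2 →
      pvCell (extend_diag_rays grid) q.1 q.2 = pvVal grid q := by
  rw [pvA_eq_fold grid hne]
  obtain ⟨hsh, hcell⟩ := pvFold_cell grid hpre (pvRM grid) grid (pvRM_inb grid) rfl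
  exact ⟨hsh, fun q hq1 hq2 => hcell q hq1 hq2⟩

-- B side --------------------------------------------------------------------

theorem pvNearest_some_iff (grid : List (List Int)) (d : Int × Int) (fuel : Nat) :
    ∀ (p0 : Int × Int) (a b v : Int),
    pvNearest grid (grid.length : Int) ((grid.headD []).length : Int) d.1 d.2 fuel p0.1 p0.2 = some (a, b, v)
      ↔ ∃ t : Nat, t < fuel ∧ (a, b) = pvAddk p0 d (t : Int) ∧ pvInbP grid (a, b) ∧
          pvCell grid a b ≠ 0 ∧ v = pvCell grid a b ∧
          ∀ u : Nat, u < t → pvZP grid (pvAddk p0 d (u : Int)) := by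
  induction fuel with
  | zero =>
    intro p0 a b v
    simp only [pvNearest]
    constructor
    · intro h; cases h
    · rintro ⟨t, ht, _⟩; omega
  | succ fuel ih =>
    intro p0 a b v
    have hguard : (0 ≤ p0.1 ∧ p0.1 < (grid.length : Int) ∧ 0 ≤ p0.2 ∧
        p0.2 < ((grid.headD []).length : Int)) ↔ pvInbP grid p0 := Iff.rfl
    simp only [pvNearest]
    by_cases hin : pvInbP grid p0
    · rw [if_pos (hguard.mpr hin)]
      by_cases hnz : pvCell grid p0.1 p0.2 ≠ 0
      · rw [if_pos hnz]
        constructor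
        · intro h
          injection h with h
          injection h with h1 h
          injection h with h2 h3
          subst h1; subst h2; subst h3
          exact ⟨0, by omega, by simp [pvAddk_zero], by simpa using hin, hnz, rfl,
            fun u hu => by omega⟩
        · rintro ⟨t, ht, heq, hinb, hnz', hv, hall⟩
          match t, ht, heq, hall with
          | 0, _, heq, _ =>
            simp only [Nat.cast_zero, pvAddk_zero] at heq
            simp only [Prod.ext_iff] at heq
            rw [heq.1, heq.2] at hv ⊢
            rw [hv]
          | (s+1), hs, heq, hall =>
            exact absurd (hall 0 (by omega)).2 (by simpa [pvAddk_zero] using hnz)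
      · rw [if_neg hnz]
        push_neg at hnz
        have e1 : p0.1 + d.1 = (pvAddk p0 d 1).1 := by simp [pvAddk]
        have e2 : p0.2 + d.2 = (pvAddk p0 d 1).2 := by simp [pvAddk]
        rw [e1, e2, ih (pvAddk p0 d 1) a b v]
        constructor
        · rintro ⟨t, ht, heq, hinb, hnz', hv, hall⟩
          refine ⟨t+1, by omega, ?_, hinb, hnz', hv, fun u hu => ?_⟩
          · rw [pvAddk_shift] at heq; push_cast at heq ⊢; exact heq
          · match u, hu with
            | 0, _ => exact ⟨by simpa [pvAddk_zero] using hin, by simpa [pvAddk_zero] using hnz⟩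
            | (u'+1), hu =>
              have := hall u' (by omega)
              rw [pvAddk_shift] at this; push_cast at this ⊢; exact this
        · rintro ⟨t, ht, heq, hinb, hnz', hv, hall⟩
          match t, ht, heq, hall with
          | 0, _, heq, _ =>
            simp only [Nat.cast_zero, pvAddk_zero] at heq
            simp only [Prod.ext_iff] at heq
            rw [← heq.1, ← heq.2] at hnz
            exact absurd hnz hnz'
          | (s+1), hs, heq, hall =>
            refine ⟨s, by omega, ?_, hinb, hnz', hv, fun u hu => ?_⟩
            · rw [pvAddk_shift]; push_cast at heq ⊢; exact heq
            · have := hall (u+1) (by omega)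
              rw [pvAddk_shift]; push_cast at this ⊢; exact this
    · rw [if_neg (fun hg => hin (hguard.mp hg))]
      constructor
      · intro h; cases h
      · rintro ⟨t, ht, heq, hinb, hnz', hv, hall⟩
        match t, ht, heq, hall with
        | 0, _, heq, _ =>
          simp only [Nat.cast_zero, pvAddk_zero] at heq
          exact absurd (heq ▸ hinb) hin
        | (s+1), hs, heq, hall =>
          exact absurd (hall 0 (by omega)).1 (by simpa [pvAddk_zero] using hin)

theorem pvDirs_neg (e : Int × Int) (he : e ∈ pvDirs) : ((-e.1, -e.2) : Int × Int) ∈ pvDirs := by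
  simp [pvDirs] at he ⊢
  rcases he with rfl | rfl | rfl | rfl <;> simp

theorem pvAddk_cancel (s q e : Int × Int) (k : Int) :
    q = pvAddk s (-e.1, -e.2) k ↔ s = pvAddk q e k := by
  simp only [pvAddk, Prod.ext_iff]
  constructor <;> rintro ⟨h1, h2⟩ <;> constructor <;> linarith

theorem pvAddk_rev (s q e : Int × Int) (k j : Int) (h : s = pvAddk q e k) :
    pvAddk s (-e.1, -e.2) j = pvAddk q e (k - j) := by
  simp only [pvAddk, Prod.ext_iff] at h ⊢
  constructor <;> [linarith [h.1]; linarith [h.2]]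

-- writers only write originally-zero cells
theorem pvWr_target_zero (grid : List (List Int)) (s q : Int × Int)
    (h : pvWr grid s q) : pvZP grid q := by
  obtain ⟨_, _, d, hd, t, ht, hq, hall⟩ := h
  exact hq ▸ hall t le_rfl

-- correspondence: candidates of cell q are exactly its writers
theorem pvCand_iff_writer (grid : List (List Int)) (q : Int × Int) (hq : pvZP grid q)
    (e : Int × Int) (he : e ∈ pvDirs) (a b v : Int) :
    pvNearest grid (grid.length : Int) ((grid.headD []).length : Int) e.1 e.2 (grid.length + 1)
        (q.1 + e.1) (q.2 + e.2) = some (a, b, v)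
      ↔ pvCell grid a b = v ∧ pvWr grid (a, b) q ∧
          ∃ t : Nat, pvChain grid (a, b) (-e.1, -e.2) t q := by
  have e1 : q.1 + e.1 = (pvAddk q e 1).1 := by simp [pvAddk]
  have e2 : q.2 + e.2 = (pvAddk q e 1).2 := by simp [pvAddk]
  rw [e1, e2, pvNearest_some_iff grid e (grid.length + 1) (pvAddk q e 1) a b v]
  constructor
  · rintro ⟨t, ht, heq, hinb, hnz, hv, hall⟩
    have heq' : (a, b) = pvAddk q e ((t : Int) + 1) := by
      rw [pvAddk_shift] at heq; exact heq
    have hch : pvChain grid (a, b) (-e.1, -e.2) t q := by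
      refine ⟨?_, fun u hu => ?_⟩
      · rw [pvAddk_cancel]; exact heq'
      · rw [pvAddk_rev (a,b) q e ((t : Int)+1) _ heq']
        rcases Nat.lt_or_ge u t with hut | hut
        · have := hall (t - u - 1) (by omega)
          rw [pvAddk_shift] at this
          have harg : ((t : Int) + 1) - ((u : Int) + 1) = ((t - u - 1 : Nat) : Int) + 1 := by
            push_cast [Nat.cast_sub (by omega : u + 1 ≤ t)]; omega
          rw [harg]; exact this
        · have hut' : u = t := by omega
          subst hut'
          simpa [pvAddk_zero] using hq
    refine ⟨hv.symm, ⟨hinb, hnz, (-e.1, -e.2), pvDirs_neg e he, t,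
      pvChain_bound grid (a,b) _ q t (pvDirs_neg e he) hch, hch⟩, t, hch⟩
  · rintro ⟨hv, ⟨hinb, hnz, _, _, _, _, _⟩, t, hch⟩
    have hd' := pvDirs_neg e he
    have htb := pvChain_bound grid (a,b) _ q t hd' hch
    obtain ⟨hqe, hall⟩ := hch
    have heq' : (a, b) = pvAddk q e ((t : Int) + 1) := by
      rw [← pvAddk_cancel]; exact hqe
    refine ⟨t, by omega, ?_, hinb, hnz, hv.symm, fun u hu => ?_⟩
    · rw [pvAddk_shift]; exact heq'
    · have := hall (t - u - 1) (by omega)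
      rw [pvAddk_rev (a,b) q e ((t : Int)+1) _ heq'] at this
      have harg : ((t : Int) + 1) - (((t - u - 1 : Nat) : Int) + 1) = ((u : Int) + 1) := by
        push_cast [Nat.cast_sub (by omega : u + 1 ≤ t)]; omega
      rw [harg] at this
      rw [pvAddk_shift]
      push_cast at this ⊢
      exact this

-- lex order on coordinates
def pvLt (x y : Int × Int) : Prop := x.1 < y.1 ∨ (x.1 = y.1 ∧ x.2 < y.2)

theorem pvRM_pairwise (grid : List (List Int)) : (pvRM grid).Pairwise pvLt := by
  unfold pvRM
  rw [List.pairwise_flatMap]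
  constructor
  · intro r hr
    exact (PySem.List.pairwise_lt_pyRange_one _ _).map _ (fun a b h => Or.inr ⟨rfl, h⟩)
  · refine (PySem.List.pairwise_lt_pyRange_one _ _).imp ?_
    intro a b hab x hx y hy
    simp only [List.mem_map] at hx hy
    obtain ⟨c, _, rfl⟩ := hx
    obtain ⟨c2, _, rfl⟩ := hy
    exact Or.inl hab

theorem pvGetLast_filter_some_iff {α : Type} (lt : α → α → Prop)
    (hasym : ∀ x y, lt x y → ¬ lt y x) (p : α → Bool) (m : α) :
    ∀ (L : List α), L.Pairwise lt → ((L.filter p).getLast? = some m ↔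
      m ∈ L ∧ p m = true ∧ ∀ x ∈ L, p x = true → x = m ∨ lt x m) := by
  intro L
  induction L with
  | nil => simp
  | cons a L ih =>
    intro hP
    obtain ⟨ha, hP2⟩ := List.pairwise_cons.mp hP
    rw [List.filter_cons]
    by_cases hpa : p a = true
    · rw [if_pos hpa]
      rcases heq : L.filter p with _ | ⟨b, fl⟩
      · have hnone : ∀ x ∈ L, ¬ p x = true := List.filter_eq_nil_iff.mp heq
        simp only [List.getLast?_singleton, Option.some.injEq]
        constructor
        · rintro rfl
          exact ⟨List.mem_cons_self, hpa, fun x hx hpx => by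
            rcases List.mem_cons.mp hx with rfl | hxL
            · exact Or.inl rfl
            · exact absurd hpx (hnone x hxL)⟩
        · rintro ⟨hm, hpm, _⟩
          rcases List.mem_cons.mp hm with rfl | hmL
          · rfl
          · exact absurd hpm (hnone m hmL)
      · rw [List.getLast?_cons_cons, ← heq, ih hP2]
        have hbL : b ∈ L ∧ p b = true := by
          have hbf : b ∈ L.filter p := by rw [heq]; exact List.mem_cons_self
          exact ⟨List.mem_of_mem_filter hbf, List.of_mem_filter hbf⟩
        constructor
        · rintro ⟨hm, hpm, hmax⟩
          refine ⟨List.mem_cons_of_mem _ hm, hpm, fun x hx hpx => ?_⟩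
          rcases List.mem_cons.mp hx with rfl | hxL
          · exact Or.inr (ha m hm)
          · exact hmax x hxL hpx
        · rintro ⟨hm, hpm, hmax⟩
          have hmL : m ∈ L := by
            rcases List.mem_cons.mp hm with rfl | hmL
            · rcases hmax b (List.mem_cons_of_mem _ hbL.1) hbL.2 with rfl | hlt
              · exact absurd (ha b hbL.1) (fun h => hasym _ _ h h)
              · exact absurd (ha b hbL.1) (hasym _ _ hlt)
            · exact hmL
          exact ⟨hmL, hpm, fun x hx hpx => hmax x (List.mem_cons_of_mem _ hx) hpx⟩
    · rw [if_neg hpa, ih hP2]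
      constructor
      · rintro ⟨hm, hpm, hmax⟩
        refine ⟨List.mem_cons_of_mem _ hm, hpm, fun x hx hpx => ?_⟩
        rcases List.mem_cons.mp hx with rfl | hxL
        · exact absurd hpx hpa
        · exact hmax x hxL hpx
      · rintro ⟨hm, hpm, hmax⟩
        have hmL : m ∈ L := by
          rcases List.mem_cons.mp hm with rfl | hmL
          · exact absurd hpm hpa
          · exact hmL
        exact ⟨hmL, hpm, fun x hx hpx => hmax x (List.mem_cons_of_mem _ hx) hpx⟩

-- strict order in which candidates compare below the winning writer
abbrev pvCLt (x y : Int × Int × Int) : Prop :=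
  x.1 < y.1 ∨ (x.1 = y.1 ∧ x.2.1 < y.2.1)

theorem pvGtStep_of_lt (b p : Int × Int × Int) (h : pvCLt b p) : pvGtStep b p = p := by
  obtain ⟨b1, b2, b3⟩ := b; obtain ⟨p1, p2, p3⟩ := p
  unfold pvGtStep
  rw [if_pos]
  rcases h with h | ⟨h1, h2⟩
  · exact Or.inl h
  · exact Or.inr ⟨h1, Or.inl h2⟩

theorem pvGtStep_of_ge (b p : Int × Int × Int) (h : p = b ∨ pvCLt p b) : pvGtStep b p = b := by
  obtain ⟨b1, b2, b3⟩ := b; obtain ⟨p1, p2, p3⟩ := p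
  unfold pvGtStep
  rw [if_neg]
  simp only [pvCLt, Prod.mk.injEq] at h ⊢
  rintro (hc | ⟨hc1, hc2 | ⟨hc2', hc3⟩⟩) <;>
    rcases h with ⟨e1, e2, e3⟩ | (h | ⟨h1, h2⟩) <;> omega

-- Python's max loop lands on the writer m when m is present and dominates all candidates
theorem pvFoldMax (m : Int × Int × Int) :
    ∀ (L : List (Int × Int × Int)) (acc : Int × Int × Int),
    (acc = m ∨ m ∈ L) →
    (∀ x, (x = acc ∨ x ∈ L) → x = m ∨ pvCLt x m) →
    L.foldl pvGtStep acc = m := by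
  intro L
  induction L with
  | nil =>
    intro acc h1 _
    rcases h1 with rfl | h
    · rfl
    · cases h
  | cons p L ih =>
    intro acc h1 h2
    rw [List.foldl_cons]
    have hacc : acc = m ∨ pvCLt acc m := h2 acc (Or.inl rfl)
    have hp : p = m ∨ pvCLt p m := h2 p (Or.inr List.mem_cons_self)
    have hsub : pvGtStep acc p = acc ∨ pvGtStep acc p = p := by
      unfold pvGtStep; split_ifs <;> simp
    refine ih (pvGtStep acc p) ?_ ?_
    · rcases h1 with h1 | hm
      · left
        rcases hp with hpm | hlt
        · rcases hsub with h | h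
          · rw [h]; exact h1
          · rw [h]; exact hpm
        · rw [pvGtStep_of_ge acc p (Or.inr (by rw [h1]; exact hlt))]; exact h1
      · rcases List.mem_cons.mp hm with hmp | hmL
        · rcases hacc with haccm | hlt
          · left
            rcases hsub with h | h
            · rw [h]; exact haccm
            · rw [h]; exact hmp.symm
          · left
            rw [pvGtStep_of_lt acc p (by rw [← hmp]; exact hlt)]; exact hmp.symm
        · exact Or.inr hmL
    · intro x hx
      rcases hx with hxe | hxL
      · rcases hsub with h | h
        · rw [h] at hxe; exact h2 x (Or.inl hxe)
        · rw [h] at hxe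
          exact h2 x (Or.inr (by rw [hxe]; exact List.mem_cons_self))
      · exact h2 x (Or.inr (List.mem_cons_of_mem _ hxL))

-- no writer of an originally nonzero cell
theorem pvVal_of_nonzero (grid : List (List Int)) (q : Int × Int)
    (hq : pvCell grid q.1 q.2 ≠ 0) : pvVal grid q = pvCell grid q.1 q.2 := by
  unfold pvVal
  rw [show (pvRM grid).filter (fun s => pvWB grid s q) = [] from
    List.filter_eq_nil_iff.mpr (fun s _ hws =>
      hq (pvWr_target_zero grid s q ((pvWB_iff _ _ _).mp hws)).2)]
  rfl

theorem pvLt_asymm (x y : Int × Int) (h : pvLt x y) : ¬ pvLt y x := by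
  unfold pvLt at *
  rintro (h2 | ⟨h1a, h2a⟩) <;> rcases h with h3 | ⟨h1, h4⟩ <;> omega

-- B's fill() computes exactly the characterized value on originally-zero in-bounds cells
theorem pvFill_char (grid : List (List Int)) (q : Int × Int)
    (hq : pvInbP grid q) (hz : pvCell grid q.1 q.2 = 0) :
    pvFill grid (grid.length : Int) ((grid.headD []).length : Int) q.1 q.2 = pvVal grid q := by
  have hqZ : pvZP grid q := ⟨hq, hz⟩
  unfold pvFill
  rcases hlast : ((pvRM grid).filter (fun s => pvWB grid s q)).getLast? with _ | s
  · -- no writer: every directional candidate is empty, so the candidate list is []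
    have hno : ∀ s ∈ pvRM grid, ¬ pvWB grid s q = true :=
      List.filter_eq_nil_iff.mp (List.getLast?_eq_none_iff.mp hlast)
    have hcnil : pvCands grid (grid.length : Int) ((grid.headD []).length : Int) q.1 q.2 = [] := by
      apply List.filterMap_eq_nil_iff.mpr
      intro d hd
      rcases hfd : pvNearest grid (grid.length : Int) ((grid.headD []).length : Int) d.1 d.2
          (grid.length + 1) (q.1 + d.1) (q.2 + d.2) with _ | c
      · rfl
      · obtain ⟨c1, c2, c3⟩ := c
        obtain ⟨_, hwr, _⟩ := (pvCand_iff_writer grid q hqZ d hd c1 c2 c3).mp hfd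
        exact absurd ((pvWB_iff grid (c1, c2) q).mpr hwr)
          (hno (c1, c2) (pvInb_mem_RM grid (c1, c2) hwr.1))
    rw [hcnil]
    unfold pvVal
    rw [hlast, hz]
  · -- a last writer s exists: it is in the candidate list and dominates every candidate
    obtain ⟨hsRM, hsW, hsMax⟩ := (pvGetLast_filter_some_iff pvLt pvLt_asymm
      (fun s => pvWB grid s q) s (pvRM grid) (pvRM_pairwise grid)).mp hlast
    have hwr : pvWr grid s q := (pvWB_iff grid s q).mp hsW
    have hmem : (s.1, s.2, pvCell grid s.1 s.2)
        ∈ pvCands grid (grid.length : Int) ((grid.headD []).length : Int) q.1 q.2 := by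
      obtain ⟨hinb, hnz, d, hd, t, ht, hch⟩ := hwr
      refine List.mem_filterMap.mpr ⟨(-d.1, -d.2), pvDirs_neg d hd, ?_⟩
      refine (pvCand_iff_writer grid q hqZ (-d.1, -d.2) (pvDirs_neg d hd) s.1 s.2
        (pvCell grid s.1 s.2)).mpr ⟨rfl, by simpa using (pvWB_iff grid s q).mp hsW, t, ?_⟩
      simpa using hch
    have hdom : ∀ x ∈ pvCands grid (grid.length : Int) ((grid.headD []).length : Int) q.1 q.2,
        x = (s.1, s.2, pvCell grid s.1 s.2) ∨ pvCLt x (s.1, s.2, pvCell grid s.1 s.2) := by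
      rintro ⟨x1, x2, x3⟩ hx
      obtain ⟨d, hd, hfd⟩ := List.mem_filterMap.mp hx
      obtain ⟨hcell, hwrx, _⟩ := (pvCand_iff_writer grid q hqZ d hd x1 x2 x3).mp hfd
      have hmemx : (x1, x2) ∈ pvRM grid := pvInb_mem_RM grid (x1, x2) hwrx.1
      rcases hsMax (x1, x2) hmemx ((pvWB_iff grid (x1, x2) q).mpr hwrx) with heq | hlt
      · left
        have h1' : x1 = s.1 := congrArg Prod.fst heq
        have h2' : x2 = s.2 := congrArg Prod.snd heq
        subst h1'; subst h2'
        simp [Prod.ext_iff, ← hcell]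
      · right
        unfold pvLt at hlt
        exact hlt
    rcases hc : pvCands grid (grid.length : Int) ((grid.headD []).length : Int) q.1 q.2
        with _ | ⟨x, xs⟩
    · rw [hc] at hmem; cases hmem
    · rw [hc] at hmem hdom
      have hfold : xs.foldl pvGtStep x = (s.1, s.2, pvCell grid s.1 s.2) := by
        refine pvFoldMax _ xs x ?_ ?_
        · rcases List.mem_cons.mp hmem with h | h
          · exact Or.inl h.symm
          · exact Or.inr h
        · intro y hy
          rcases hy with rfl | hyL
          · exact hdom y List.mem_cons_self
          · exact hdom y (List.mem_cons_of_mem _ hyL)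
      show (xs.foldl pvGtStep x).2.2 = pvVal grid q
      rw [hfold]
      unfold pvVal
      rw [hlast]

-- final assembly helpers
theorem pvCell_getElem (m : List (List Int)) (i j : Nat) (hi : i < m.length)
    (hj : j < m[i].length) : pvCell m (i : Int) (j : Int) = m[i][j] := by
  simp [pvCell, List.getD, List.getElem?_eq_getElem, hi, hj]

theorem pvShape_row_len (res grid : List (List Int)) (hsh : pvShape res = pvShape grid)
    (i : Nat) (hi : i < res.length) (hi2 : i < grid.length) : res[i].length = grid[i].length := by
  have h5 : (res.map List.length)[i]'(by simpa using hi)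
      = (grid.map List.length)[i]'(by simpa using hi2) := by
    simp only [pvShape] at hsh; simp [hsh]
  simpa using h5

-- writers' targets are in bounds: pvVal of an out-of-bounds cell is its original value
theorem pvVal_of_not_inb (grid : List (List Int)) (q : Int × Int)
    (h : ¬ pvInbP grid q) : pvVal grid q = pvCell grid q.1 q.2 := by
  unfold pvVal
  rw [show (pvRM grid).filter (fun s => pvWB grid s q) = [] from
    List.filter_eq_nil_iff.mpr (fun s _ hws =>
      h (pvWr_target_zero grid s q ((pvWB_iff _ _ _).mp hws)).1)]
  rfl

-- B's per-cell write step
def pvStepB (grid : List (List Int)) (res : List (List Int)) (q : Int × Int) : List (List Int) :=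
  if pvCell grid q.1 q.2 = 0 then
    pvSet2 res q.1 q.2
      (pvFill grid (grid.length : Int) ((grid.headD []).length : Int) q.1 q.2)
  else res

theorem pvStepB_of_zero (grid res : List (List Int)) (q : Int × Int)
    (h : pvCell grid q.1 q.2 = 0) :
    pvStepB grid res q = pvSet2 res q.1 q.2
      (pvFill grid (grid.length : Int) ((grid.headD []).length : Int) q.1 q.2) := by
  simp [pvStepB, h]

theorem pvStepB_of_nonzero (grid res : List (List Int)) (q : Int × Int)
    (h : ¬ pvCell grid q.1 q.2 = 0) : pvStepB grid res q = res := by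
  simp [pvStepB, h]

theorem pvFoldB (grid : List (List Int)) (hpre : Pre_extend_diag_rays grid) :
    ∀ (L : List (Int × Int)) (res : List (List Int)), (∀ s ∈ L, pvInbP grid s) →
    pvShape res = pvShape grid →
    pvShape (L.foldl (pvStepB grid) res) = pvShape grid ∧
    ∀ (q : Int × Int), 0 ≤ q.1 → 0 ≤ q.2 →
      pvCell (L.foldl (pvStepB grid) res) q.1 q.2
        = if q ∈ L ∧ pvCell grid q.1 q.2 = 0 then
            pvFill grid (grid.length : Int) ((grid.headD []).length : Int) q.1 q.2
          else pvCell res q.1 q.2 := by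
  intro L
  induction L using List.reverseRecOn with
  | nil => intro res _ hsh; exact ⟨hsh, fun q _ _ => by simp⟩
  | append_singleton L s ih =>
    intro res hmem hsh
    have hmemL : ∀ x ∈ L, pvInbP grid x := fun x hx => hmem x (by simp [hx])
    have hs : pvInbP grid s := hmem s (by simp)
    obtain ⟨ihsh, ihcell⟩ := ih res hmemL hsh
    rw [List.foldl_append]
    simp only [List.foldl_cons, List.foldl_nil]
    have hstep_sh : pvShape (pvStepB grid (L.foldl (pvStepB grid) res) s) = pvShape grid := by
      by_cases hzs : pvCell grid s.1 s.2 = 0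
      · rw [pvStepB_of_zero grid _ s hzs, pvShape_set2 _ _ _ _ hs.1 hs.2.2.1, ihsh]
      · rw [pvStepB_of_nonzero grid _ s hzs, ihsh]
    refine ⟨hstep_sh, fun q hq1 hq2 => ?_⟩
    have ihq := ihcell q hq1 hq2
    by_cases hzs : pvCell grid s.1 s.2 = 0
    · rw [pvStepB_of_zero grid _ s hzs]
      have hw := pvWritable grid (L.foldl (pvStepB grid) res) s ihsh hpre hs
      rw [pvCell_set2 _ _ _ _ _ _ hs.1 hs.2.2.1 hq1 hq2 hw.1 hw.2]
      by_cases hqs : q = s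
      · subst hqs
        rw [if_pos ⟨rfl, rfl⟩, if_pos ⟨by simp, hzs⟩]
      · rw [if_neg (fun h => hqs (Prod.ext h.1 h.2)), ihq]
        have hcond : (q ∈ L ++ [s] ∧ pvCell grid q.1 q.2 = 0)
            ↔ (q ∈ L ∧ pvCell grid q.1 q.2 = 0) := by
          simp only [List.mem_append, List.mem_singleton]
          constructor
          · rintro ⟨h1 | h1, h2⟩
            · exact ⟨h1, h2⟩
            · exact absurd h1 hqs
          · rintro ⟨h1, h2⟩; exact ⟨Or.inl h1, h2⟩
        by_cases hin : q ∈ L ∧ pvCell grid q.1 q.2 = 0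
        · rw [if_pos hin, if_pos (hcond.mpr hin)]
        · rw [if_neg hin, if_neg (fun h => hin (hcond.mp h))]
    · rw [pvStepB_of_nonzero grid _ s hzs, ihq]
      have hcond : (q ∈ L ++ [s] ∧ pvCell grid q.1 q.2 = 0)
          ↔ (q ∈ L ∧ pvCell grid q.1 q.2 = 0) := by
        simp only [List.mem_append, List.mem_singleton]
        constructor
        · rintro ⟨h1 | h1, h2⟩
          · exact ⟨h1, h2⟩
          · exact absurd h2 (h1 ▸ hzs)
        · rintro ⟨h1, h2⟩; exact ⟨Or.inl h1, h2⟩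
      by_cases hin : q ∈ L ∧ pvCell grid q.1 q.2 = 0
      · rw [if_pos hin, if_pos (hcond.mpr hin)]
      · rw [if_neg hin, if_neg (fun h => hin (hcond.mp h))]

theorem pvB_eq_fold (grid : List (List Int)) (hne : ¬ (grid = [] ∨ grid.headD [] = [])) :
    extend_diag_rays_alt grid = (pvRM grid).foldl (pvStepB grid) grid := by
  rw [extend_diag_rays_alt, if_neg hne]
  simp only [pvRM, List.foldl_flatMap, List.foldl_map, pvStepB]

-- lists of the same shape with the same cells are equal
theorem pvEq_of_cell (X Y : List (List Int)) (hsh : pvShape X = pvShape Y)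
    (h : ∀ i j : Nat, pvCell X (i : Int) (j : Int) = pvCell Y (i : Int) (j : Int)) : X = Y := by
  have hlen : X.length = Y.length := by simpa [pvShape] using congrArg List.length hsh
  apply List.ext_getElem hlen
  intro i hi1 hi2
  have hrl : X[i].length = Y[i].length := pvShape_row_len X Y hsh i hi1 hi2
  apply List.ext_getElem hrl
  intro j hj1 hj2
  have hc := h i j
  rwa [pvCell_getElem X i j hi1 hj1, pvCell_getElem Y i j hi2 hj2] at hc

-- ===== VERDICT (by name: the statement is the Claim_ definition above) =====
theorem extend_diag_rays_spec : Claim_equal_extend_diag_rays := by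
  intro grid _ hpre
  unfold Spec_extend_diag_rays
  by_cases hne : grid = [] ∨ grid.headD [] = []
  · rw [extend_diag_rays, extend_diag_rays_alt, if_pos hne, if_pos hne]
  · obtain ⟨hshA, hcellA⟩ := pvA_char grid hpre hne
    rw [pvB_eq_fold grid hne]
    obtain ⟨hshB, hcellB⟩ := pvFoldB grid hpre (pvRM grid) grid (pvRM_inb grid) rfl
    apply pvEq_of_cell _ _ (by rw [hshA, hshB])
    intro i j
    rw [hcellA ((i : Int), (j : Int)) (by positivity) (by positivity),
        hcellB ((i : Int), (j : Int)) (by positivity) (by positivity)]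
    by_cases hin : ((i : Int), (j : Int)) ∈ pvRM grid ∧ pvCell grid (i : Int) (j : Int) = 0
    · rw [if_pos hin,
        pvFill_char grid ((i : Int), (j : Int)) (pvRM_inb grid _ hin.1) hin.2]
    · rw [if_neg hin]
      by_cases hz : pvCell grid (i : Int) (j : Int) = 0
      · have hni : ¬ pvInbP grid ((i : Int), (j : Int)) := fun hb =>
          hin ⟨pvInb_mem_RM grid _ hb, hz⟩
        exact pvVal_of_not_inb grid _ hni
      · exact pvVal_of_nonzero grid _ hz
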